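-- pv_equiv track=rewrite | github.com/Mrackushka/Cryptosystem | src/logic/ciphers/trithemius.py | _validate_list_structure
-- ===== SOURCE A (Python) =====
-- def _validate_list_structure(list_):
--     previous_len = None
--     if len(list_) == 0:
--         return False
--     for el in list_:
--         if isinstance(el, list):
--             if len(el) in (2, 3):
--                 if previous_len:
--                     if len(el) != previous_len:
--                         return False
--                 else:
--                     previous_len = len(el)
--             else:
--                 return False
--         else:
--             return False
--     return True
-- ===== SOURCE B (Python) =====
-- def _validate_list_structure(list_):
--     if not all(isinstance(el, list) and len(el) in (2, 3) for el in list_):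
--         return False
--     return len({len(el) for el in list_}) == 1
-- ===== Notes on version B (the rewrite author's own statement) =====
-- stated objective: idiomatic
-- what changed: Replaced the single loop that threads a previous_len state with early returns by a two-pass formulation: an all() shape check followed by collapsing the lengths into a set and testing its cardinality (which also subsumes the empty-list guard).
import Mathlib
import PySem

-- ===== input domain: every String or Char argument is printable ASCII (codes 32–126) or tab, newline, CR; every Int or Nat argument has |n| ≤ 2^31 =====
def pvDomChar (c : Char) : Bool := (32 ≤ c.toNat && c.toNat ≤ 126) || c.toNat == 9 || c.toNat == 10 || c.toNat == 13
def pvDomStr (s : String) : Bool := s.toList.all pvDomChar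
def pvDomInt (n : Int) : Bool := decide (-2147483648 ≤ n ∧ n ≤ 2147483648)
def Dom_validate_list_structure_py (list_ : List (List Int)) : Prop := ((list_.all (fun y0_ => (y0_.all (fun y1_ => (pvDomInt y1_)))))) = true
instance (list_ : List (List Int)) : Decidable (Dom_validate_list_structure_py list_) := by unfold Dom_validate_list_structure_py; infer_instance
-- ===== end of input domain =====

-- B replaces A's single loop threading a previous_len state by a two-pass check:
-- validate every sublist's length, then collapse the lengths into a set and test
-- its cardinality (idiomatic; same O(n) cost).


-- ===== PORT A =====
-- the for-loop with its previous_len state and early returns; `if previous_len:`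
-- is ported as a match on the Option (exact here: the stored lengths are 2 or 3, never 0)
def pvLoopA : List (List Int) → Option Int → Bool
  | [], _ => true
  | el :: rest, prev =>
    if el.length = 2 ∨ el.length = 3 then
      match prev with
      | some p => if (el.length : Int) ≠ p then false else pvLoopA rest (some p)
      | none => pvLoopA rest (some (el.length : Int))
    else false

def validate_list_structure_py (list_ : List (List Int)) : Bool :=
  if list_.length = 0 then false else pvLoopA list_ none

-- ===== PORT B =====
def validate_list_structure_py_alt (list_ : List (List Int)) : Bool :=
  if !(list_.all (fun el => decide (el.length = 2 ∨ el.length = 3))) then false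
  else decide ((PySem.Set.ofList (list_.map (fun el => (el.length : Int)))).length = 1)

-- ===== PRECONDITION & SPEC =====
def Spec_validate_list_structure_py (list_ : List (List Int)) (out : Bool) : Prop := out = validate_list_structure_py_alt list_
instance (list_ : List (List Int)) (out : Bool) : Decidable (Spec_validate_list_structure_py list_ out) := by unfold Spec_validate_list_structure_py; infer_instance

-- ===== CLAIM (what is proved, stated in full; the proofs are below) =====
def Claim_equal_validate_list_structure_py : Prop := ∀ (list_ : List (List Int)), Dom_validate_list_structure_py list_ → Spec_validate_list_structure_py list_ (validate_list_structure_py list_)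

-- ===== LEMMAS AND PROOFS =====

-- A's loop with a set previous_len p accepts exactly: every element has length 2 or 3 equal to p
theorem pvLoopA_some (l : List (List Int)) (p : Int) :
    pvLoopA l (some p) = l.all (fun el => decide ((el.length = 2 ∨ el.length = 3) ∧ (el.length : Int) = p)) := by
  induction l with
  | nil => rfl
  | cons el rest ih =>
    simp only [pvLoopA, List.all_cons]
    by_cases h : el.length = 2 ∨ el.length = 3
    · simp only [if_pos h]
      by_cases hp : (el.length : Int) = p
      · simp [hp, h, ih]
      · simp [hp, h]
    · simp [h]

-- if every element of xs equals x, folding Set.add over [x] stays [x]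
theorem pv_fold_add_const (xs : List Int) (x : Int) (h : ∀ y ∈ xs, y = x) :
    xs.foldl PySem.Set.add [x] = [x] := by
  induction xs with
  | nil => rfl
  | cons y ys ih =>
    have hy : y = x := h y (by simp)
    have : PySem.Set.add [x] y = [x] := by
      simp [PySem.Set.add, PySem.Set.contains, hy]
    simp only [List.foldl_cons, this]
    exact ih (fun z hz => h z (by simp [hz]))

theorem pv_set_cons_len_one (x : Int) (xs : List Int) :
    (PySem.Set.ofList (x :: xs)).length = 1 ↔ ∀ y ∈ xs, y = x := by
  constructor
  · intro hlen y hy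
    obtain ⟨z, hz⟩ := List.length_eq_one_iff.mp hlen
    have hxz : x ∈ PySem.Set.ofList (x :: xs) := by
      rw [PySem.Set.mem_ofList]; simp
    have hyz : y ∈ PySem.Set.ofList (x :: xs) := by
      rw [PySem.Set.mem_ofList]; simp [hy]
    rw [hz] at hxz hyz
    simp only [List.mem_singleton] at hxz hyz
    exact hyz.trans hxz.symm
  · intro h
    have h1 : PySem.Set.ofList (x :: xs) = [x] := by
      rw [PySem.Set.ofList_eq_foldl]
      simp only [List.foldl_cons]
      show List.foldl PySem.Set.add (PySem.Set.add [] x) xs = [x]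
      have hstep : PySem.Set.add ([] : List Int) x = [x] := rfl
      rw [hstep]
      exact pv_fold_add_const xs x h
    rw [h1]
    rfl

theorem pv_bool_ext (a b : Bool) (h : a = true ↔ b = true) : a = b := by
  cases a <;> cases b <;> simp_all

-- ===== VERDICT (by name: the statement is the Claim_ definition above) =====
theorem validate_list_structure_py_spec : Claim_equal_validate_list_structure_py := by
  intro list_ _
  unfold Spec_validate_list_structure_py validate_list_structure_py validate_list_structure_py_alt
  cases list_ with
  | nil => rfl
  | cons el rest =>
    simp only [List.length_cons, List.all_cons, pvLoopA]
    by_cases h : el.length = 2 ∨ el.length = 3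
    · rw [if_neg (by omega), if_pos h, pvLoopA_some]
      by_cases hr : ∀ y ∈ rest, y.length = 2 ∨ y.length = 3
      · have hA : (rest.all fun el2 => decide (el2.length = 2 ∨ el2.length = 3)) = true := by
          simp only [List.all_eq_true]; intro y hy; simp [hr y hy]
        simp only [h, decide_true, Bool.true_and, hA, Bool.not_true, Bool.false_eq_true, if_false]
        apply pv_bool_ext
        simp only [List.all_eq_true, decide_eq_true_eq, List.map_cons]
        rw [pv_set_cons_len_one]
        constructor
        · intro H y hy
          obtain ⟨z, hz, hzy⟩ := List.mem_map.mp hy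
          rw [← hzy]
          exact (H z hz).2
        · intro H y hy
          refine ⟨hr y hy, ?_⟩
          exact_mod_cast H ((y.length : Int)) (List.mem_map.mpr ⟨y, hy, rfl⟩)
      · push_neg at hr
        obtain ⟨y, hy, hy2⟩ := hr
        have hA : (rest.all fun el2 => decide ((el2.length = 2 ∨ el2.length = 3) ∧ (el2.length : Int) = (el.length : Int))) = false := by
          simp only [List.all_eq_false]
          exact ⟨y, hy, by simp [hy2]⟩
        have hB : (rest.all fun el2 => decide (el2.length = 2 ∨ el2.length = 3)) = false := by
          simp only [List.all_eq_false]
          exact ⟨y, hy, by simp [hy2]⟩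
        simp only [hA, hB, h, decide_true, Bool.true_and, Bool.not_false]
        simp
    · simp [h]
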